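-- pv_equiv track=rewrite | github.com/fullbleed-engine/fullbleed-official | python/fullbleed_cli/cli.py | _infer_schema_from_argv
-- ===== SOURCE A (Python) =====
-- SCHEMA_REGISTRY = {
--     "render": "fullbleed.render_result.v1",
--     "verify": "fullbleed.verify_result.v1",
--     "plan": "fullbleed.plan_result.v1",
--     "run": "fullbleed.run_result.v1",
--     "compliance": "fullbleed.compliance.v1",
--     "capabilities": "fullbleed.capabilities.v1",
--     "debug-perf": "fullbleed.debug_perf.v1",
--     "debug-jit": "fullbleed.debug_jit.v1",
--     "doctor": "fullbleed.doctor.v1",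
--     "assets:list": "fullbleed.assets_list.v1",
--     "assets:info": "fullbleed.assets_info.v1",
--     "assets:install": "fullbleed.assets_install.v1",
--     "assets:verify": "fullbleed.assets_verify.v1",
--     "assets:lock": "fullbleed.assets_lock.v1",
--     "cache:dir": "fullbleed.cache_dir.v1",
--     "cache:prune": "fullbleed.cache_prune.v1",
--     "init": "fullbleed.init.v1",
--     "new": "fullbleed.new_template.v1",
-- }
--
-- def _infer_schema_from_argv(argv):
--     """Infer requested schema id from argv when `--schema` is present."""
--     tokens = [t for t in (argv or []) if t != "--schema"]
--     command = None
--     sub = None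
--     for t in tokens:
--         if t.startswith("-"):
--             continue
--         command = t
--         break
--     if not command:
--         return None
--     if command in {"assets", "cache"}:
--         found_command = False
--         for t in tokens:
--             if t == command:
--                 found_command = True
--                 continue
--             if not found_command:
--                 continue
--             if t.startswith("-"):
--                 continue
--             sub = t
--             break
--         if not sub:
--             return None
--         return SCHEMA_REGISTRY.get(f"{command}:{sub}")
--     return SCHEMA_REGISTRY.get(command)
-- ===== SOURCE B (Python) =====
-- SCHEMA_REGISTRY = {
--     "render": "fullbleed.render_result.v1",
--     "verify": "fullbleed.verify_result.v1",
--     "plan": "fullbleed.plan_result.v1",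
--     "run": "fullbleed.run_result.v1",
--     "compliance": "fullbleed.compliance.v1",
--     "capabilities": "fullbleed.capabilities.v1",
--     "debug-perf": "fullbleed.debug_perf.v1",
--     "debug-jit": "fullbleed.debug_jit.v1",
--     "doctor": "fullbleed.doctor.v1",
--     "assets:list": "fullbleed.assets_list.v1",
--     "assets:info": "fullbleed.assets_info.v1",
--     "assets:install": "fullbleed.assets_install.v1",
--     "assets:verify": "fullbleed.assets_verify.v1",
--     "assets:lock": "fullbleed.assets_lock.v1",
--     "cache:dir": "fullbleed.cache_dir.v1",
--     "cache:prune": "fullbleed.cache_prune.v1",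
--     "init": "fullbleed.init.v1",
--     "new": "fullbleed.new_template.v1",
-- }
--
--
-- def _infer_schema_from_argv(argv):
--     """Infer requested schema id from argv: one filter pass, then positional indexing."""
--     positionals = [t for t in (argv or []) if not t.startswith("-")]
--     if not positionals:
--         return None
--     command = positionals[0]
--     if command in ("assets", "cache"):
--         if len(positionals) < 2:
--             return None
--         return SCHEMA_REGISTRY.get(f"{command}:{positionals[1]}")
--     return SCHEMA_REGISTRY.get(command)
-- ===== Notes on version B (the rewrite author's own statement) =====
-- stated objective: simpler
-- what changed: Replaces A's two targeted break/continue scans over a '--schema'-stripped token list by one filter of the non-dash positionals plus direct indexing (command = positionals[0], sub = positionals[1]).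
-- intended difference: When the command token ('assets' or 'cache') is immediately repeated among the positionals and the first later positional that differs from it forms a known 'command:sub' key (e.g. ['assets','assets','list']), A silently skips every duplicate of the command and returns that schema id, while B treats the second positional as the subcommand and returns None; B's reading is intended because a duplicated command token is not a subcommand and should not be silently swallowed. — e.g. on _infer_schema_from_argv(some ["assets", "assets", "list"]): A returns some "fullbleed.assets_list.v1", B returns none
import Mathlib
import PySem

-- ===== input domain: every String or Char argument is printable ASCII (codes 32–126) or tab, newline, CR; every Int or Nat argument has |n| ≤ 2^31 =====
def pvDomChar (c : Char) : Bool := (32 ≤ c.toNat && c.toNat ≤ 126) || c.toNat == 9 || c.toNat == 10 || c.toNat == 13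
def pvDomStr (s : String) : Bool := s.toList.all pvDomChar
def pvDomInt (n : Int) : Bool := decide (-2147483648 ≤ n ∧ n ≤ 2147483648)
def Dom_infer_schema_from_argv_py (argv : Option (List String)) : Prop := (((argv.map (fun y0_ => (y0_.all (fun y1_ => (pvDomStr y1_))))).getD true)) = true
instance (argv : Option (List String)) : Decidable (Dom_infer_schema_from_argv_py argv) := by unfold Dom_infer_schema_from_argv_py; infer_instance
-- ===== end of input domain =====

-- B replaces A's two break/continue scans by one non-dash filter plus positional indexing
-- (simpler decomposition, same cost); on argv that repeat the command token A and B
-- intentionally differ — see D_infer_schema_from_argv_py below.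

-- ===== PORT A =====
def pySchemaRegistry : PySem.Dict String String := PySem.Dict.mk [
  ("render", "fullbleed.render_result.v1"),
  ("verify", "fullbleed.verify_result.v1"),
  ("plan", "fullbleed.plan_result.v1"),
  ("run", "fullbleed.run_result.v1"),
  ("compliance", "fullbleed.compliance.v1"),
  ("capabilities", "fullbleed.capabilities.v1"),
  ("debug-perf", "fullbleed.debug_perf.v1"),
  ("debug-jit", "fullbleed.debug_jit.v1"),
  ("doctor", "fullbleed.doctor.v1"),
  ("assets:list", "fullbleed.assets_list.v1"),
  ("assets:info", "fullbleed.assets_info.v1"),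
  ("assets:install", "fullbleed.assets_install.v1"),
  ("assets:verify", "fullbleed.assets_verify.v1"),
  ("assets:lock", "fullbleed.assets_lock.v1"),
  ("cache:dir", "fullbleed.cache_dir.v1"),
  ("cache:prune", "fullbleed.cache_prune.v1"),
  ("init", "fullbleed.init.v1"),
  ("new", "fullbleed.new_template.v1")]

-- A's first break/continue loop: the first token not starting with "-"
def aFindCommand : List String → Option String
  | [] => none
  | t :: ts => if PySem.Str.startswith t "-" then aFindCommand ts else some t

-- A's second break/continue loop: skip until (and including every) token equal to
-- `command`, then take the first non-dash token
def aFindSub (command : String) (found : Bool) : List String → Option String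
  | [] => none
  | t :: ts =>
    if t == command then aFindSub command true ts
    else if !found then aFindSub command found ts
    else if PySem.Str.startswith t "-" then aFindSub command found ts
    else some t

def infer_schema_from_argv_py (argv : Option (List String)) : Option String :=
  let tokens := (argv.getD []).filter (fun t => !(t == "--schema"))
  match aFindCommand tokens with
  | none => none                                    -- `if not command` (command is None)
  | some command =>
    if command == "" then none                      -- `if not command` (empty string)
    else if command == "assets" || command == "cache" then
      match aFindSub command false tokens with
      | none => none                                -- `if not sub` (sub is None)
      | some sub =>
        if sub == "" then none                      -- `if not sub` (empty string)
        else pySchemaRegistry.get? (command ++ ":" ++ sub)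
    else pySchemaRegistry.get? command

-- ===== PORT B =====
def infer_schema_from_argv_py_alt (argv : Option (List String)) : Option String :=
  match (argv.getD []).filter (fun t => !(PySem.Str.startswith t "-")) with
  | [] => none
  | command :: rest =>
    if command == "assets" || command == "cache" then
      match rest with
      | [] => none
      | sub :: _ => pySchemaRegistry.get? (command ++ ":" ++ sub)
    else pySchemaRegistry.get? command

-- ===== PRECONDITION & SPEC =====
-- the subcommands the CLI documents for a command (empty for non-grouped commands)
def pvSubsOf : String → List String
  | "assets" => ["list", "info", "install", "verify", "lock"]
  | "cache" => ["dir", "prune"]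
  | _ => []

-- When the command token ('assets' or 'cache') is immediately repeated among the positionals
-- and the first later positional differing from it forms a known 'command:sub' key, A skips
-- the duplicates and returns that schema id while B treats the duplicate as the subcommand
-- and returns None; B's reading is intended: a duplicated command token is not a subcommand
-- and should not be silently swallowed.
def D_infer_schema_from_argv_py (argv : Option (List String)) : Prop :=
  (match (argv.getD []).filter (fun t => !(PySem.Str.startswith t "-")) with
   | c :: rest =>
     (rest.head? == some c) &&
       ((rest.find? (fun t => !(t == c))).any (fun s => (pvSubsOf c).contains s))
   | [] => false) = true

instance (argv : Option (List String)) : Decidable (D_infer_schema_from_argv_py argv) := by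
  unfold D_infer_schema_from_argv_py; infer_instance

def Spec_infer_schema_from_argv_py (argv : Option (List String)) (out : Option String) : Prop :=
  ¬ D_infer_schema_from_argv_py argv → out = infer_schema_from_argv_py_alt argv
instance (argv : Option (List String)) (out : Option String) : Decidable (Spec_infer_schema_from_argv_py argv out) := by unfold Spec_infer_schema_from_argv_py; infer_instance

def pvDiffWitness_infer_schema_from_argv_py : Option (List String) := some ["assets", "assets", "list"]
def pvDiffWitnessOut_infer_schema_from_argv_py : (Option String) × (Option String) :=
  (some "fullbleed.assets_list.v1", none)

-- ===== CLAIM (what is proved, stated in full; the proofs are below) =====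
def Claim_unchanged_infer_schema_from_argv_py : Prop := ∀ (argv : Option (List String)), Dom_infer_schema_from_argv_py argv → Spec_infer_schema_from_argv_py argv (infer_schema_from_argv_py argv)
def Claim_changed_infer_schema_from_argv_py : Prop := Dom_infer_schema_from_argv_py (pvDiffWitness_infer_schema_from_argv_py) ∧ D_infer_schema_from_argv_py (pvDiffWitness_infer_schema_from_argv_py) ∧ infer_schema_from_argv_py (pvDiffWitness_infer_schema_from_argv_py) = pvDiffWitnessOut_infer_schema_from_argv_py.1 ∧ infer_schema_from_argv_py_alt (pvDiffWitness_infer_schema_from_argv_py) = pvDiffWitnessOut_infer_schema_from_argv_py.2 ∧ pvDiffWitnessOut_infer_schema_from_argv_py.1 ≠ pvDiffWitnessOut_infer_schema_from_argv_py.2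
def Claim_exact_infer_schema_from_argv_py : Prop := ∀ (argv : Option (List String)), Dom_infer_schema_from_argv_py argv → D_infer_schema_from_argv_py argv → infer_schema_from_argv_py argv ≠ infer_schema_from_argv_py_alt argv

-- ===== LEMMAS AND PROOFS =====

-- abbreviations for the two filters
def pvPos (l : List String) : List String := l.filter (fun t => !(PySem.Str.startswith t "-"))
def pvTok (l : List String) : List String := l.filter (fun t => !(t == "--schema"))

theorem pvSchemaStarts : PySem.Str.startswith "--schema" "-" = true := by decide

theorem pvTok_keep (t : String) (ts : List String) (h : (t == "--schema") = false) :
    pvTok (t :: ts) = t :: pvTok ts := by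
  simp only [pvTok, List.filter_cons, h]; rfl

theorem pvTok_drop (ts : List String) : pvTok ("--schema" :: ts) = pvTok ts := rfl

theorem pvPos_keep (t : String) (ts : List String) (h : PySem.Str.startswith t "-" = false) :
    pvPos (t :: ts) = t :: pvPos ts := by
  simp only [pvPos, List.filter_cons, h]; rfl

theorem pvPos_drop (t : String) (ts : List String) (h : PySem.Str.startswith t "-" = true) :
    pvPos (t :: ts) = pvPos ts := by
  simp only [pvPos, List.filter_cons, h]; rfl

theorem pv_not_schema (t : String) (h : PySem.Str.startswith t "-" = false) :
    (t == "--schema") = false := by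
  rw [beq_eq_false_iff_ne]; intro he; subst he; rw [pvSchemaStarts] at h; cases h

-- A's first loop finds exactly the head of the positionals
theorem aFindCommand_eq_head? (l : List String) : aFindCommand (pvTok l) = (pvPos l).head? := by
  induction l with
  | nil => rfl
  | cons t ts ih =>
    cases hs : PySem.Str.startswith t "-" with
    | false =>
      rw [pvTok_keep t ts (pv_not_schema t hs), pvPos_keep t ts hs]
      simp only [aFindCommand, hs]; rfl
    | true =>
      rw [pvPos_drop t ts hs]
      by_cases hsch : t = "--schema"
      · subst hsch; rw [pvTok_drop]; exact ih
      · rw [pvTok_keep t ts (beq_eq_false_iff_ne.mpr hsch)]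
        simp only [aFindCommand, hs]
        simpa using ih

-- A's second loop, found-phase: the first positional different from the command
theorem aFindSub_true (c : String) (l : List String) :
    aFindSub c true (pvTok l) = (pvPos l).find? (fun t => !(t == c)) := by
  induction l with
  | nil => rfl
  | cons t ts ih =>
    cases hs : PySem.Str.startswith t "-" with
    | false =>
      rw [pvTok_keep t ts (pv_not_schema t hs), pvPos_keep t ts hs]
      cases hc : t == c with
      | false => simp only [aFindSub, hc, hs, List.find?_cons, Bool.not_false]; rfl
      | true => simp only [aFindSub, hc, List.find?_cons, Bool.not_true]; exact ih
    | true =>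
      rw [pvPos_drop t ts hs]
      by_cases hsch : t = "--schema"
      · subst hsch; rw [pvTok_drop]; exact ih
      · rw [pvTok_keep t ts (beq_eq_false_iff_ne.mpr hsch)]
        cases hc : t == c with
        | false => simp only [aFindSub, hc, hs]; simpa using ih
        | true => simp only [aFindSub, hc]; exact ih

-- A's second loop from the start: once the positionals are c :: rest, it returns the
-- first element of rest different from c
theorem aFindSub_false (c : String) (rest : List String) (l : List String)
    (h : pvPos l = c :: rest) :
    aFindSub c false (pvTok l) = rest.find? (fun t => !(t == c)) := by
  induction l with
  | nil => simp [pvPos] at h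
  | cons t ts ih =>
    cases hs : PySem.Str.startswith t "-" with
    | false =>
      rw [pvPos_keep t ts hs] at h
      obtain ⟨htc, hrest⟩ : t = c ∧ pvPos ts = rest := ⟨by injection h, by injection h⟩
      rw [pvTok_keep t ts (pv_not_schema t hs)]
      simp only [aFindSub, beq_iff_eq.mpr htc]
      rw [if_pos trivial, aFindSub_true c ts, hrest]
    | true =>
      rw [pvPos_drop t ts hs] at h
      have hc : (t == c) = false := by
        rw [beq_eq_false_iff_ne]; intro he
        have hmem : c ∈ pvPos ts := by rw [h]; exact List.mem_cons_self
        simp only [pvPos] at hmem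
        have h2 := List.of_mem_filter hmem
        have h3 : (!(PySem.Str.startswith c "-")) = true := h2
        have hcs : PySem.Str.startswith c "-" = true := by rw [← he]; exact hs
        rw [hcs] at h3; simp at h3
      by_cases hsch : t = "--schema"
      · subst hsch; rw [pvTok_drop]; exact ih h
      · rw [pvTok_keep t ts (beq_eq_false_iff_ne.mpr hsch)]
        simp only [aFindSub, hc]
        simpa using ih h

-- A evaluated through the positionals of the input
theorem portA_eq (argv : Option (List String)) :
    infer_schema_from_argv_py argv =
      (match pvPos (argv.getD []) with
       | [] => none
       | c :: rest =>
         if c == "" then none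
         else if c == "assets" || c == "cache" then
           match rest.find? (fun t => !(t == c)) with
           | none => none
           | some sub => if sub == "" then none
                         else pySchemaRegistry.get? (c ++ ":" ++ sub)
         else pySchemaRegistry.get? c) := by
  show (match aFindCommand (pvTok (argv.getD [])) with
        | none => none
        | some command =>
          if command == "" then none
          else if command == "assets" || command == "cache" then
            match aFindSub command false (pvTok (argv.getD [])) with
            | none => none
            | some sub => if sub == "" then none
                          else pySchemaRegistry.get? (command ++ ":" ++ sub)
          else pySchemaRegistry.get? command) = _
  rw [aFindCommand_eq_head?]
  cases hps : pvPos (argv.getD []) with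
  | nil => rfl
  | cons c rest =>
    simp only [List.head?]
    rw [aFindSub_false c rest _ hps]

-- registry lookups A's guards and B's indexing both send to none
theorem get_empty : pySchemaRegistry.get? "" = none := by decide
theorem get_self (c : String) (hc : c = "assets" ∨ c = "cache") :
    pySchemaRegistry.get? (c ++ ":" ++ c) = none := by
  rcases hc with hc | hc <;> subst hc <;> decide

-- get? misses "c:s" whenever (c, s) is not a known subcommand pair (c ∈ {assets, cache})
theorem get_miss (c s : String) (hc : c = "assets" ∨ c = "cache")
    (h : (pvSubsOf c).contains s = false) :
    pySchemaRegistry.get? (c ++ ":" ++ s) = none := by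
  rw [PySem.Dict.get?_eq_none_iff_not_mem_keys]
  rcases hc with hc | hc <;> subst hc <;>
  · intro hmem
    simp only [pySchemaRegistry, PySem.Dict.keys_mk, List.map_cons, List.map_nil,
      List.mem_cons, List.not_mem_nil, or_false] at hmem
    rcases hmem with hm | hm | hm | hm | hm | hm | hm | hm | hm | hm | hm | hm | hm | hm | hm | hm | hm | hm <;>
    · have htl := congrArg String.toList hm
      simp only [String.toList_append] at htl
      simp at htl
      all_goals
        (have hs' := congrArg String.ofList htl
         rw [String.ofList_toList] at hs'
         subst hs'
         exact absurd h (by decide))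

-- proof-side views of the two programs after the positionals are split off
def pvASide (c : String) (rest : List String) : Option String :=
  if c == "" then none
  else if c == "assets" || c == "cache" then
    match rest.find? (fun t => !(t == c)) with
    | none => none
    | some sub => if sub == "" then none else pySchemaRegistry.get? (c ++ ":" ++ sub)
  else pySchemaRegistry.get? c

def pvBSide (c : String) (rest : List String) : Option String :=
  if c == "assets" || c == "cache" then
    match rest with
    | [] => none
    | sub :: _ => pySchemaRegistry.get? (c ++ ":" ++ sub)
  else pySchemaRegistry.get? c

theorem infer_schema_from_argv_py_spec : Claim_unchanged_infer_schema_from_argv_py := by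
  unfold Claim_unchanged_infer_schema_from_argv_py
  intro argv _ hnd
  rw [portA_eq]
  unfold D_infer_schema_from_argv_py at hnd
  unfold infer_schema_from_argv_py_alt
  rw [show ((argv.getD []).filter (fun t => !(PySem.Str.startswith t "-"))) = pvPos (argv.getD []) from rfl] at hnd ⊢
  cases hps : pvPos (argv.getD []) with
  | nil => rfl
  | cons c rest =>
    rw [hps] at hnd
    have hnd' : ¬ (((rest.head? == some c) &&
        ((rest.find? (fun t => !(t == c))).any (fun s => (pvSubsOf c).contains s))) = true) := hnd
    change pvASide c rest = pvBSide c rest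
    unfold pvASide pvBSide
    cases hac : (c == "assets" || c == "cache") with
    | false =>
      cases hce : (c == "") with
      | true =>
        have hc0 : c = "" := beq_iff_eq.mp hce
        subst hc0
        rw [if_pos (by decide), if_neg (by decide)]
        exact get_empty.symm
      | false => rfl
    | true =>
      have hcform : c = "assets" ∨ c = "cache" := by simpa using hac
      have hce : (c == "") = false := by
        rcases hcform with h | h <;> subst h <;> decide
      simp only [hce, Bool.false_eq_true, if_false, if_true]
      cases rest with
      | nil => rfl
      | cons s r =>
        cases hsc : s == c with
        | false =>
          simp only [List.find?_cons, hsc, Bool.not_false]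
          cases hse : s == "" with
          | false => rfl
          | true =>
            have hs0 : s = "" := beq_iff_eq.mp hse
            subst hs0
            rcases hcform with h | h <;> subst h <;> decide
        | true =>
          have hsc0 : s = c := beq_iff_eq.mp hsc
          subst hsc0
          have hD : ((s :: r).find? (fun t => !(t == s))).any
              (fun x => (pvSubsOf s).contains x) = false := by
            by_contra hx
            apply hnd'
            simp only [List.head?, beq_self_eq_true, Bool.true_and]
            exact Bool.of_not_eq_false hx
          simp only [List.find?_cons, beq_self_eq_true, Bool.not_true] at hD ⊢
          cases hf : r.find? (fun t => !(t == s)) with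
          | none => exact (get_self s hcform).symm
          | some s' =>
            rw [hf] at hD
            simp only [Option.any_some] at hD
            cases hse : s' == "" with
            | true =>
              have hs0 : s' = "" := beq_iff_eq.mp hse
              subst hs0
              exact (get_self s hcform).symm
            | false =>
              change (if (s' == "") = true then none
                      else pySchemaRegistry.get? (s ++ ":" ++ s')) =
                     pySchemaRegistry.get? (s ++ ":" ++ s)
              rw [hse, get_miss s s' hcform hD, get_self s hcform]
              rfl

theorem infer_schema_from_argv_py_changed : Claim_changed_infer_schema_from_argv_py := by
  unfold Claim_changed_infer_schema_from_argv_py; decide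

theorem infer_schema_from_argv_py_tight : Claim_exact_infer_schema_from_argv_py := by
  unfold Claim_exact_infer_schema_from_argv_py
  intro argv _ hD
  rw [portA_eq]
  unfold D_infer_schema_from_argv_py at hD
  unfold infer_schema_from_argv_py_alt
  rw [show ((argv.getD []).filter (fun t => !(PySem.Str.startswith t "-"))) = pvPos (argv.getD []) from rfl] at hD ⊢
  cases hps : pvPos (argv.getD []) with
  | nil => rw [hps] at hD; cases hD
  | cons c rest =>
    rw [hps] at hD
    have hD' : ((rest.head? == some c) &&
        ((rest.find? (fun t => !(t == c))).any (fun s => (pvSubsOf c).contains s))) = true := hD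
    rw [Bool.and_eq_true] at hD'
    obtain ⟨hhead, hany⟩ := hD'
    change pvASide c rest ≠ pvBSide c rest
    unfold pvASide pvBSide
    cases rest with
    | nil => cases hhead
    | cons s r =>
      have hsc : s = c := by
        simp only [List.head?, beq_iff_eq, Option.some.injEq] at hhead; exact hhead
      subst hsc
      simp only [List.find?_cons, beq_self_eq_true, Bool.not_true] at hany ⊢
      cases hf : r.find? (fun t => !(t == s)) with
      | none => rw [hf] at hany; cases hany
      | some s' =>
        rw [hf] at hany
        simp only [Option.any_some] at hany
        -- the seven concrete pairs: in each, A returns a schema id and B returns none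
        rcases eq_or_ne s "assets" with hA | hA
        · subst hA
          have hs : s' = "list" ∨ s' = "info" ∨ s' = "install" ∨ s' = "verify" ∨ s' = "lock" := by
            simpa [pvSubsOf] using hany
          rcases hs with hs | hs | hs | hs | hs <;> subst hs <;> decide
        · rcases eq_or_ne s "cache" with hC | hC
          · subst hC
            have hs : s' = "dir" ∨ s' = "prune" := by simpa [pvSubsOf] using hany
            rcases hs with hs | hs <;> subst hs <;> decide
          · exfalso
            rw [show pvSubsOf s = [] by rw [pvSubsOf.eq_def]; split <;> simp_all] at hany
            simp at hany
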